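-- pv_equiv track=rewrite | github.com/buomsoo-kim/Introduction-to-Python-Programming | Session3/source code/3-1/3-1-6.py | score_calculator
-- ===== SOURCE A (Python) =====
-- def score_calculator(result):
--     sequence = 1
--     score = 0
--     for r in result:
--         if r == 'O':
--             score += sequence
--             sequence += 1
--         else:
--             sequence = 1
--     return score
-- ===== SOURCE B (Python) =====
-- from itertools import groupby
--
-- def score_calculator(result):
--     score = 0
--     for key, grp in groupby(result):
--         if key == 'O':
--             k = sum(1 for _ in grp)
--             score += k * (k + 1) // 2
--     return score
-- ===== Notes on version B (the rewrite author's own statement) =====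
-- stated objective: idiomatic
-- what changed: Replaces the per-element running-counter loop with itertools.groupby over maximal runs plus the closed-form triangular number k*(k+1)//2 for each 'O' run.
import Mathlib
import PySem

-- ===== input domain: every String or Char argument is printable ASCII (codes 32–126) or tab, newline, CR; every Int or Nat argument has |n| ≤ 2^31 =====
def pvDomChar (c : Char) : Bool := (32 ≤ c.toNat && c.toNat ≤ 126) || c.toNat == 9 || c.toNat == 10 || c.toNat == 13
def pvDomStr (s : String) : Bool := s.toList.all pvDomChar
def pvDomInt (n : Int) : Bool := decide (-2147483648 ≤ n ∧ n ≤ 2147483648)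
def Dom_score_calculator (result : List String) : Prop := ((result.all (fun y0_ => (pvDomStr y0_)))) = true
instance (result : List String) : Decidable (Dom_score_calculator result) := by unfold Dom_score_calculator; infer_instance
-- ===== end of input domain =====

-- B replaces A's per-element running-counter loop with grouping into maximal runs
-- and a closed-form triangular number per 'O' run (idiomatic; same asymptotic cost).


-- ===== PORT A =====
-- literal transliteration: state (sequence, score), one fold over the list
def score_calculator (result : List String) : Int :=
  (result.foldl
    (fun (st : Int × Int) r =>
      if r == "O" then (st.1 + 1, st.2 + st.1) else ((1 : Int), st.2))
    ((1 : Int), (0 : Int))).2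

-- ===== PORT B =====
-- transliteration of Source B: peel one maximal run of equal elements at a time;
-- an 'O' run of length k contributes k*(k+1)//2
def score_calculator_alt (result : List String) : Int :=
  match result with
  | [] => 0
  | x :: xs =>
    let k : Int := (((xs.takeWhile (fun y => y == x)).length + 1 : Nat) : Int)
    (if x == "O" then PySem.Int.floordiv (k * (k + 1)) 2 else 0)
      + score_calculator_alt (xs.dropWhile (fun y => y == x))
  termination_by result.length
  decreasing_by
    simp only [List.length_cons]
    exact Nat.lt_succ_of_le (List.length_dropWhile_le _ _)

-- ===== PRECONDITION & SPEC =====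
def Spec_score_calculator (result : List String) (out : Int) : Prop := out = score_calculator_alt result
instance (result : List String) (out : Int) : Decidable (Spec_score_calculator result out) := by unfold Spec_score_calculator; infer_instance

-- ===== CLAIM (what is proved, stated in full; the proofs are below) =====
def Claim_equal_score_calculator : Prop := ∀ (result : List String), Dom_score_calculator result → Spec_score_calculator result (score_calculator result)

-- ===== LEMMAS AND PROOFS =====

-- the triangular term of B, as a Nat-division cast
theorem pv_tri_cast (k : Nat) :
    PySem.Int.floordiv ((k : Int) * ((k : Int) + 1)) 2 = ((k * (k + 1) / 2 : Nat) : Int) := by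
  have h : ((k : Int) * ((k : Int) + 1)) = ((k * (k + 1) : Nat) : Int) := by push_cast; ring
  rw [h]
  exact_mod_cast PySem.Int.floordiv_natCast (k * (k + 1)) 2

theorem pv_tri_succ (m : Nat) :
    ((m + 1) * (m + 1 + 1) / 2 : Nat) = m * (m + 1) / 2 + (m + 1) := by
  have h : (m + 1) * (m + 1 + 1) = m * (m + 1) + (m + 1) * 2 := by ring
  rw [h, Nat.add_mul_div_right _ _ (by norm_num : 0 < 2)]

-- B skips a leading non-'O' run in one step
theorem pv_alt_drop (x : String) (xs : List String) (hx : ¬ x = "O") :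
    score_calculator_alt (x :: xs) = score_calculator_alt (xs.dropWhile (fun y => y == x)) := by
  simp only [score_calculator_alt]
  simp [hx]

-- B peels an 'O' run of length (hr xs + 1) off the front
theorem pv_alt_O_run (xs : List String) :
    score_calculator_alt xs =
      (((xs.takeWhile (fun y => y == "O")).length * ((xs.takeWhile (fun y => y == "O")).length + 1) / 2 : Nat) : Int)
        + score_calculator_alt (xs.dropWhile (fun y => y == "O")) := by
  match xs with
  | [] => simp [score_calculator_alt]
  | y :: ys =>
    by_cases hy : y = "O"
    · subst hy
      conv_lhs => rw [score_calculator_alt]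
      simp only [List.takeWhile_cons, List.dropWhile_cons, beq_self_eq_true, if_true, List.length_cons]
      rw [pv_tri_cast]
    · rw [List.takeWhile_cons, List.dropWhile_cons]
      simp [hy]

-- A's loop from state (seq, score) = score + B's value + a correction on the leading 'O' run
theorem pv_main (n : Nat) : ∀ (l : List String) (seq score : Int), l.length ≤ n →
    (l.foldl
      (fun (st : Int × Int) r =>
        if r == "O" then (st.1 + 1, st.2 + st.1) else ((1 : Int), st.2))
      (seq, score)).2
    = score + score_calculator_alt l
        + (seq - 1) * ((l.takeWhile (fun y => y == "O")).length : Int) := by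
  induction n with
  | zero =>
    intro l seq score hl
    have : l = [] := List.length_eq_zero_iff.mp (Nat.le_zero.mp hl)
    subst this
    simp [score_calculator_alt]
  | succ n ih =>
    intro l seq score hl
    match l with
    | [] => simp [score_calculator_alt]
    | x :: xs =>
      have hxs : xs.length ≤ n := by simpa using Nat.succ_le_succ_iff.mp hl
      by_cases hx : x = "O"
      · subst hx
        rw [List.foldl_cons]
        simp only [beq_self_eq_true, if_true]
        rw [ih xs (seq + 1) (score + seq) hxs]
        rw [pv_alt_O_run xs]
        conv_rhs => rw [score_calculator_alt]
        simp only [List.takeWhile_cons, beq_self_eq_true, if_true, List.length_cons]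
        rw [pv_tri_cast, pv_tri_succ]
        push_cast
        ring
      · rw [List.foldl_cons]
        have hb : (x == "O") = false := by simp [hx]
        rw [hb]
        simp only [Bool.false_eq_true, if_false]
        rw [ih xs 1 score hxs]
        rw [pv_alt_drop x xs hx]
        have hdrop : score_calculator_alt xs = score_calculator_alt (xs.dropWhile (fun y => y == x)) := by
          match xs with
          | [] => simp
          | z :: zs =>
            by_cases hz : z = x
            · subst hz
              rw [pv_alt_drop z zs hx, List.dropWhile_cons]
              simp
            · rw [List.dropWhile_cons]
              simp [hz]
        rw [hdrop]
        rw [List.takeWhile_cons, hb]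
        simp only [Bool.false_eq_true, if_false, List.length_nil, Int.natCast_zero]
        ring

-- ===== VERDICT (by name: the statement is the Claim_ definition above) =====
theorem score_calculator_spec : Claim_equal_score_calculator := by
  intro result _
  unfold Spec_score_calculator score_calculator
  rw [pv_main result.length result 1 0 (le_refl _)]
  ring
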